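-- pv_equiv track=rewrite | github.com/Heir-of-God/Project-S | HackerRank/PreparationKits/3months/Week7/3 goodland_electricity.py | pylons
-- ===== SOURCE A (Python) =====
-- def pylons(k: int, arr: list[int]) -> int:
--     last_unpowered_ind = 0
--     last_can_build_station = -1
--     k -= 1
--     res = 0
--
--     for ind, city in enumerate(arr):
--         last_can_build_station = ind if city == 1 else last_can_build_station
--         if last_unpowered_ind + k == ind or (ind == len(arr) - 1):
--             if last_can_build_station == -1:
--                 return -1
--             res += 1
--             last_unpowered_ind = last_can_build_station + k + 1
--             if last_unpowered_ind > len(arr) - 1: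
--                 break
--             last_can_build_station = -1
--
--     return res
-- ===== SOURCE B (Python) =====
-- def pylons(k: int, arr: list[int]) -> int:
--     n = len(arr)
--     count = 0
--     cover = 0  # first city not yet powered
--     while cover < n:
--         hi = min(n - 1, cover + (k - 1))
--         lo = max(0, cover - (k - 1))
--         station = None
--         for s in range(hi, lo - 1, -1):  # rightmost station in the window
--             if arr[s] == 1:
--                 station = s
--                 break
--         if station is None:
--             return -1
--         count += 1
--         if hi == n - 1:  # the scan window reached the end of the array: done
--             break
--         cover = station + k
--     return count
-- ===== Notes on version B (the rewrite author's own statement) =====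
-- stated objective: alternative
-- what changed: Replaces A's single forward pass with accumulator state (last_unpowered_ind/last_can_build_station/res) by a jumping greedy: an outer loop over the first-uncovered city and an inner backward for-scan of the clamped window for the rightmost station, keeping A's rule that the loop ends once the window reaches the last index.
-- outside the precondition, e.g. on pylons(0, [1, 0, 1]): A returns 1, B returns -1; on pylons(-2, [0, 1]): A returns 1, B returns -1
import Mathlib
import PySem

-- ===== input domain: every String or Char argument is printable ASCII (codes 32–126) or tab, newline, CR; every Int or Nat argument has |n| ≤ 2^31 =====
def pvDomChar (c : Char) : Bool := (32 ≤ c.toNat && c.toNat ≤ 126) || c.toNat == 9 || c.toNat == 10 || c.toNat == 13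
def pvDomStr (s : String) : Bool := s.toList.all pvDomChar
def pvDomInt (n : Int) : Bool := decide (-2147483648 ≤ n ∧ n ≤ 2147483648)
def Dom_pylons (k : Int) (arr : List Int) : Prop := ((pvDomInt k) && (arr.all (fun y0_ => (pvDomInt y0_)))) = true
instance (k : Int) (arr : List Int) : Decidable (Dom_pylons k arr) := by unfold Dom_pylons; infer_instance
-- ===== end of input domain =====

-- B is an alternative implementation: a jumping greedy (outer loop on the first
-- uncovered city, inner backward window scan) instead of A's single forward pass with
-- accumulator state; B keeps A's rule that the loop ends at the last array index.

-- ===== PORT A =====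
-- A's for-loop over enumerate(arr), as structural recursion on the remaining suffix;
-- state (ind, last_unpowered_ind, last_can_build_station, res); km = k - 1 (Python's `k -= 1`),
-- m = len(arr) - 1.
def loopA (km m : Int) : List Int → Int → Int → Int → Int → Int
  | [], _, _, _, res => res
  | city :: rest, ind, lup, lcbs, res =>
    let lcbs' := if city = 1 then ind else lcbs
    if lup + km = ind ∨ ind = m then
      if lcbs' = -1 then -1
      else
        if lcbs' + km + 1 > m then res + 1
        else loopA km m rest (ind + 1) (lcbs' + km + 1) (-1) (res + 1)
    else loopA km m rest (ind + 1) lup lcbs'  res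

def pylons (k : Int) (arr : List Int) : Int :=
  loopA (k - 1) ((arr.length : Int) - 1) arr 0 0 (-1) 0

-- ===== PORT B =====
-- Source B's inner `for s in range(hi, lo - 1, -1): if arr[s] == 1: break`:
-- first (= rightmost) station index in the window [lo, hi], scanning backward
def findStation (arr : List Int) (lo : Int) (hi : Int) : Option Int :=
  (PySem.List.pyRange hi (lo - 1) (-1)).findSome?
    (fun s => if PySem.List.pyGet? arr s = some 1 then some s else none)

-- Source B's outer while-loop: cover = first unpowered city, cnt = stations placed.
-- fuel is only a structural totality guard: cover grows by at least 1 per iteration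
-- (station ≥ lo ≥ cover - (k-1)), so arr.length + 1 units never run out.
def loopB (k : Int) (arr : List Int) (fuel : Nat) (cover : Int) (cnt : Int) : Int :=
  match fuel with
  | 0 => cnt
  | fuel + 1 =>
    if cover < (arr.length : Int) then
      let hi := min ((arr.length : Int) - 1) (cover + (k - 1))
      let lo := max 0 (cover - (k - 1))
      match findStation arr lo hi with
      | none => -1
      | some s =>
        if hi = (arr.length : Int) - 1 then cnt + 1
        else loopB k arr fuel (s + k) (cnt + 1)
    else cnt

def pylons_alt (k : Int) (arr : List Int) : Int :=
  loopB k arr (arr.length + 1) 0 0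

-- ===== PRECONDITION & SPEC =====
-- Pre_ excludes only nonpositive ranges k ≤ 0 on arrays that contain a station, a corner
-- outside the problem's domain (a station with range k ≤ 0 powers no city) on which A's
-- lone end-of-array trigger and B's empty scan window defensibly disagree; for k ≤ 0
-- without any station the two agree, so such inputs stay inside.
def Pre_pylons (k : Int) (arr : List Int) : Prop := 1 ≤ k ∨ ¬ (1 ∈ arr)
instance (k : Int) (arr : List Int) : Decidable (Pre_pylons k arr) := by unfold Pre_pylons; infer_instance

def pvWitness_pylons : Int × List Int := (2, [0, 1, 0, 0, 1])

def Spec_pylons (k : Int) (arr : List Int) (out : Int) : Prop := out = pylons_alt k arr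
instance (k : Int) (arr : List Int) (out : Int) : Decidable (Spec_pylons k arr out) := by unfold Spec_pylons; infer_instance

-- ===== CLAIM (what is proved, stated in full; the proofs are below) =====
def Claim_equal_pylons : Prop := ∀ (k : Int) (arr : List Int), Dom_pylons k arr → Pre_pylons k arr → Spec_pylons k arr (pylons k arr)

-- ===== LEMMAS AND PROOFS =====

-- the backward range of Source B's inner for-loop, unfolded once / empty
theorem pyRangeDown_cons (lo hi : Int) (h : lo ≤ hi) :
    PySem.List.pyRange hi (lo - 1) (-1) = hi :: PySem.List.pyRange (hi - 1) (lo - 1) (-1) := by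
  unfold PySem.List.pyRange
  norm_num
  rw [if_pos h, show (if lo < hi then (hi - lo).toNat else 0) = (hi - lo).toNat from by split <;> omega,
      show (hi - (lo - 1)).toNat = (hi - lo).toNat + 1 from by omega, List.range_succ_eq_map]
  simp only [List.map_cons, List.map_map, Nat.cast_zero, neg_zero, add_zero]
  congr 1
  apply List.map_congr_left
  intro x _
  simp only [Function.comp_apply]
  push_cast
  ring

theorem pyRangeDown_nil (lo hi : Int) (h : hi < lo) :
    PySem.List.pyRange hi (lo - 1) (-1) = [] := by
  unfold PySem.List.pyRange
  norm_num
  intro h2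
  omega

-- the scan as a recurrence (Source B's loop unrolled one step)
theorem findStation_eq (arr : List Int) (lo hi : Int) :
    findStation arr lo hi
      = if hi < lo then none
        else if PySem.List.pyGet? arr hi = some 1 then some hi
        else findStation arr lo (hi - 1) := by
  by_cases h : hi < lo
  · rw [if_pos h]
    unfold findStation
    rw [pyRangeDown_nil lo hi h]
    rfl
  · rw [if_neg h]
    unfold findStation
    rw [pyRangeDown_cons lo hi (by omega)]
    rw [List.findSome?_cons]
    by_cases hg : PySem.List.pyGet? arr hi = some 1
    · rw [if_pos hg, if_pos hg]
    · rw [if_neg hg, if_neg hg]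

-- s ∈ [lo, hi] when the scan finds s
theorem findStation_bounds (arr : List Int) (lo : Int) : ∀ (hi s : Int),
    findStation arr lo hi = some s → lo ≤ s ∧ s ≤ hi := by
  have main : ∀ d : Nat, ∀ hi s : Int, (hi + 1 - lo).toNat ≤ d →
      findStation arr lo hi = some s → lo ≤ s ∧ s ≤ hi := by
    intro d
    induction d with
    | zero =>
      intro hi s hd hfs
      rw [findStation_eq, if_pos (by omega)] at hfs
      cases hfs
    | succ d ih =>
      intro hi s hd hfs
      rw [findStation_eq] at hfs
      by_cases h : hi < lo
      · rw [if_pos h] at hfs; cases hfs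
      · rw [if_neg h] at hfs
        by_cases hg : PySem.List.pyGet? arr hi = some 1
        · rw [if_pos hg] at hfs; cases hfs; omega
        · rw [if_neg hg] at hfs
          have := ih (hi - 1) s (by omega) hfs
          omega
  intro hi s hfs
  exact main (hi + 1 - lo).toNat hi s (le_refl _) hfs

-- the scan finds the RIGHTMOST station: nothing strictly above s (and ≤ hi) is a station
theorem findStation_none_above (arr : List Int) (lo : Int) : ∀ (hi s : Int),
    findStation arr lo hi = some s → ∀ lo', s < lo' → findStation arr lo' hi = none := by
  have main : ∀ d : Nat, ∀ hi s : Int, (hi + 1 - lo).toNat ≤ d →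
      findStation arr lo hi = some s → ∀ lo', s < lo' → findStation arr lo' hi = none := by
    intro d
    induction d with
    | zero =>
      intro hi s hd hfs
      rw [findStation_eq, if_pos (by omega)] at hfs
      cases hfs
    | succ d ih =>
      intro hi s hd hfs lo' hlo'
      rw [findStation_eq] at hfs
      by_cases h : hi < lo
      · rw [if_pos h] at hfs; cases hfs
      · rw [if_neg h] at hfs
        by_cases hg : PySem.List.pyGet? arr hi = some 1
        · rw [if_pos hg] at hfs
          cases hfs
          rw [findStation_eq, if_pos hlo']
        · rw [if_neg hg] at hfs
          by_cases hcl : hi < lo'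
          · rw [findStation_eq, if_pos hcl]
          · rw [findStation_eq, if_neg hcl, if_neg hg]
            exact ih (hi - 1) s (by omega) hfs lo' hlo'
  intro hi s hfs
  exact main (hi + 1 - lo).toNat hi s (le_refl _) hfs

-- one unfold of the scan at an in-range index i ≥ lo
theorem findStation_step (arr : List Int) (lo : Int) (i : Nat) (hlo : lo ≤ (i : Int))
    (hi : i < arr.length) :
    findStation arr lo (i : Int)
      = if arr[i] = 1 then some (i : Int) else findStation arr lo ((i : Int) - 1) := by
  rw [findStation_eq, if_neg (by omega)]
  have hg : PySem.List.pyGet? arr (i : Int) = some arr[i] := by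
    simp [PySem.List.pyGet?_natCast, List.getElem?_eq_getElem hi]
  rw [hg]
  by_cases h1 : arr[i] = 1
  · rw [if_pos (by simp [h1]), if_pos h1]
  · rw [if_neg (by simp [h1]), if_neg h1]

-- what A does at a segment's trigger index T, as a function of the rightmost station found
def trigRes (km m : Int) (arr : List Int) (T : Nat) (r : Int) : Option Int → Int
  | none => -1
  | some s => if s + km + 1 > m then r + 1
      else loopA km m (arr.drop (T + 1)) ((T : Int) + 1) (s + km + 1) (-1) (r + 1)

-- A's forward pass from index i (inside a segment with cover c, rightmost station below i
-- back to lo recorded in lcbs) runs to the segment's trigger index min (c+km) m and acts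
-- there exactly on the rightmost station of the window [lo, min (c+km) m]
theorem walk (km m : Int) (arr : List Int) (hm : m = (arr.length : Int) - 1)
    (c lo : Int) (hlo : lo = max 0 (c - km)) :
    ∀ d : Nat, ∀ (i : Nat) (r : Int),
    ((i : Int) + d = min (c + km) m) →
    lo ≤ (i : Int) →
    loopA km m (arr.drop i) (i : Int) c ((findStation arr lo ((i : Int) - 1)).getD (-1)) r
      = trigRes km m arr (i + d) r (findStation arr lo (min (c + km) m)) := by
  intro d
  induction d with
  | zero =>
    intro i r ht hloi
    have hilt : i < arr.length := by omega
    rw [List.drop_eq_getElem_cons hilt]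
    rw [loopA]
    have hstep := findStation_step arr lo i hloi hilt
    have htrig : c + km = (i : Int) ∨ (i : Int) = m := by omega
    rw [if_pos htrig]
    rw [show min (c + km) m = (i : Int) from by omega]
    rcases hF : findStation arr lo ((i : Int)) with _ | s
    · -- no station in [lo, i]: both sides give -1
      have h1 : ¬ arr[i] = 1 := by
        intro h1; rw [hstep, if_pos h1] at hF; cases hF
      have hprev : findStation arr lo ((i : Int) - 1) = none := by
        rw [hstep, if_neg h1] at hF; exact hF
      rw [if_neg h1, hprev]
      simp [trigRes]
    · -- rightmost station s in [lo, i]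
      have hb := findStation_bounds arr lo (i : Int) s hF
      have hs0 : 0 ≤ s := by omega
      have hlcbs : (if arr[i] = 1 then (i : Int) else (findStation arr lo ((i : Int) - 1)).getD (-1)) = s := by
        rw [hstep] at hF
        by_cases h1 : arr[i] = 1
        · rw [if_pos h1] at hF; cases hF; rw [if_pos h1]
        · rw [if_neg h1] at hF; rw [if_neg h1, hF]; rfl
      rw [hlcbs]
      rw [if_neg (by omega)]
      norm_num [trigRes]
  | succ d ih =>
    intro i r ht hloi
    have hilt : i < arr.length := by omega
    rw [List.drop_eq_getElem_cons hilt]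
    rw [loopA]
    have htrig : ¬ (c + km = (i : Int) ∨ (i : Int) = m) := by omega
    rw [if_neg htrig]
    have hstep := findStation_step arr lo i hloi hilt
    have hlcbs : (if arr[i] = 1 then (i : Int) else (findStation arr lo ((i : Int) - 1)).getD (-1))
        = (findStation arr lo (((i + 1 : Nat) : Int) - 1)).getD (-1) := by
      have hc : (((i + 1 : Nat) : Int) - 1) = (i : Int) := by push_cast; ring
      rw [hc, hstep]
      by_cases h1 : arr[i] = 1
      · rw [if_pos h1, if_pos h1]; rfl
      · rw [if_neg h1, if_neg h1]
    rw [show ((i : Int) + 1) = ((i + 1 : Nat) : Int) from by push_cast; ring, hlcbs]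
    rw [ih (i + 1) r (by push_cast; push_cast at ht; omega) (by push_cast; omega)]
    rw [show i + 1 + d = i + (d + 1) from by omega]

-- unfold lemmas for B's outer loop
theorem loopB_none (k : Int) (arr : List Int) (fuel : Nat) (cover cnt : Int)
    (h : cover < (arr.length : Int))
    (hF : findStation arr (max 0 (cover - (k - 1))) (min ((arr.length : Int) - 1) (cover + (k - 1))) = none) :
    loopB k arr (fuel + 1) cover cnt = -1 := by
  rw [loopB]
  simp only [if_pos h, hF]

theorem loopB_some (k : Int) (arr : List Int) (fuel : Nat) (cover cnt s : Int)
    (h : cover < (arr.length : Int))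
    (hF : findStation arr (max 0 (cover - (k - 1))) (min ((arr.length : Int) - 1) (cover + (k - 1))) = some s) :
    loopB k arr (fuel + 1) cover cnt
      = if min ((arr.length : Int) - 1) (cover + (k - 1)) = (arr.length : Int) - 1 then cnt + 1
        else loopB k arr fuel (s + k) (cnt + 1) := by
  rw [loopB]
  simp only [if_pos h, hF]

theorem loopB_stop (k : Int) (arr : List Int) (fuel : Nat) (cover cnt : Int)
    (h : ¬ cover < (arr.length : Int)) :
    loopB k arr fuel cover cnt = cnt := by
  cases fuel with
  | zero => rw [loopB]
  | succ fuel => rw [loopB]; simp only [if_neg h]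

-- segment-to-segment alignment of A's pass with B's jump loop (fuel bounds B's remaining
-- iterations: each jump moves cover forward by at least one)
theorem main_align (k : Int) (arr : List Int) :
    ∀ fuel : Nat, ∀ (i : Nat) (c r : Int),
    ((arr.length : Int) - c).toNat < fuel →
    (i : Int) ≤ (arr.length : Int) - 1 →
    c ≤ (arr.length : Int) - 1 →
    (i : Int) ≤ c + (k - 1) →
    max 0 (c - (k - 1)) ≤ (i : Int) →
    findStation arr (max 0 (c - (k - 1))) ((i : Int) - 1) = none →
    loopA (k - 1) ((arr.length : Int) - 1) (arr.drop i) (i : Int) c (-1) r = loopB k arr fuel c r := by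
  intro fuel
  induction fuel with
  | zero => intro i c r hfuel hi hc _ _ _; omega
  | succ fuel ih =>
    intro i c r hfuel hi hc hik hloi hnone
    have hn1 : 1 ≤ (arr.length : Int) := by omega
    set m := (arr.length : Int) - 1 with hm
    set km := k - 1 with hkm
    set lo := max 0 (c - km) with hlo
    have hit : (i : Int) ≤ min (c + km) m := by omega
    have hw := walk km m arr hm c lo hlo (min (c + km) m - (i : Int)).toNat i r (by omega) (by omega)
    rw [show (-1 : Int) = (findStation arr lo ((i : Int) - 1)).getD (-1) from by rw [hnone]; rfl]
    rw [hw]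
    have hmin : min ((arr.length : Int) - 1) (c + (k - 1)) = min (c + km) m := by omega
    set t := min (c + km) m with hts
    set T : Nat := i + (t - (i : Int)).toNat with hT
    have hTt : (T : Int) = t := by omega
    rcases hF : findStation arr lo t with _ | s
    · rw [loopB_none k arr fuel c r (by omega) (by rw [hmin]; exact hF)]
      rfl
    · have hb := findStation_bounds arr lo t s hF
      have hs0 : 0 ≤ s := by omega
      rw [loopB_some k arr fuel c r s (by omega) (by rw [hmin]; exact hF)]
      rw [hmin]
      rw [trigRes]
      by_cases hend : t = m
      · -- the window reached the last index: B stops; A's loop has no elements left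
        rw [if_pos (by omega : t = (arr.length : Int) - 1)]
        by_cases hbig : s + km + 1 > m
        · rw [if_pos hbig]
        · rw [if_neg hbig]
          have hdrop : arr.drop (T + 1) = [] := by
            apply List.drop_eq_nil_of_le
            omega
          rw [hdrop, loopA]
      · -- interior trigger: both sides jump to cover s + k
        rw [if_neg (by omega : ¬ t = (arr.length : Int) - 1)]
        have htc : t = c + km := by omega
        by_cases hbig : s + km + 1 > m
        · rw [if_pos hbig]
          rw [loopB_stop k arr fuel (s + k) (r + 1) (by omega)]
        · rw [if_neg hbig]
          have hrec := ih (T + 1) (s + k) (r + 1)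
            (by omega)
            (by push_cast; omega)
            (by omega)
            (by push_cast; omega)
            (by push_cast; omega)
            (by
              rw [show max 0 (s + k - (k - 1)) = s + 1 from by omega]
              rw [show ((T + 1 : Nat) : Int) - 1 = t from by push_cast; omega]
              exact findStation_none_above arr lo t s hF (s + 1) (by omega))
          rw [show ((T : Int) + 1) = ((T + 1 : Nat) : Int) from by push_cast; ring,
            show s + km + 1 = s + k from by omega]
          exact hrec

-- with no station anywhere, A's pass returns -1 at its first trigger (one always fires:
-- the last index is a trigger), whatever lup is
theorem loopA_no_station (km m : Int) : ∀ (l : List Int) (ind lup res : Int),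
    (∀ x ∈ l, x ≠ 1) → ind + (l.length : Int) = m + 1 → l ≠ [] →
    loopA km m l ind lup (-1) res = -1 := by
  intro l
  induction l with
  | nil => intro _ _ _ _ _ hne; exact absurd rfl hne
  | cons x rest ih =>
    intro ind lup res hno hlen _
    rw [loopA]
    rw [if_neg (hno x List.mem_cons_self)]
    by_cases htrig : lup + km = ind ∨ ind = m
    · rw [if_pos htrig, if_pos rfl]
    · rw [if_neg htrig]
      have hrest : rest ≠ [] := by
        intro hr
        subst hr
        simp at hlen
        omega
      exact ih (ind + 1) lup res (fun y hy => hno y (List.mem_cons_of_mem x hy))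
        (by simp at hlen ⊢; omega) hrest

-- the k ≥ 1 case of the verdict
theorem pylons_eq_pos (k : Int) (arr : List Int) (hk : (1 : Int) ≤ k) (hn : ¬ arr.length = 0) :
    pylons k arr = pylons_alt k arr := by
  unfold pylons pylons_alt
  have h1 : 1 ≤ arr.length := by omega
  have := main_align k arr (arr.length + 1) 0 0 0
    (by omega)
    (by push_cast; omega)
    (by omega)
    (by simp; omega)
    (by simp; omega)
    (by
      rw [show max 0 (0 - (k - 1)) = 0 from by omega]
      rw [findStation_eq, if_pos (by norm_num)])
  simpa using this

-- ===== VERDICT (by name: the statement is the Claim_ definition above) =====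
theorem pylons_spec : Claim_equal_pylons := by
  intro k arr _ hpre
  by_cases hn : arr.length = 0
  · rcases List.eq_nil_of_length_eq_zero hn with rfl
    unfold Spec_pylons pylons pylons_alt
    rw [loopB]
    norm_num [loopA]
  by_cases hk : (1 : Int) ≤ k
  · exact pylons_eq_pos k arr hk hn
  -- remaining admitted case: k ≤ 0 and no station in arr; both sides answer -1
  have hno : ¬ (1 ∈ arr) := by
    rcases hpre with h | h
    · exact absurd h hk
    · exact h
  unfold Spec_pylons pylons pylons_alt
  rw [loopA_no_station (k - 1) ((arr.length : Int) - 1) arr 0 0 0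
    (fun x hx h1x => hno (h1x ▸ hx)) (by ring) (by intro h; subst h; simp at hn)]
  cases harr : arr.length with
  | zero => omega
  | succ nl =>
    rw [show nl + 1 + 1 = (nl + 1) + 1 from rfl, loopB]
    rw [if_pos (by omega : (0 : Int) < (arr.length : Int))]
    simp only []
    rw [show findStation arr (max 0 (0 - (k - 1))) (min ((arr.length : Int) - 1) (0 + (k - 1))) = none from by
      rw [findStation_eq, if_pos (by omega)]]
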